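-- pv_equiv track=rewrite | github.com/daniel-reich/ubiquitous-fiesta | 7AA54JmzruLMwG6do_6.py | is_icecream_sandwich
-- ===== SOURCE A (Python) =====
-- def is_icecream_sandwich(txt):
--   arr = []
--   for i in range(len(txt)-1):
--     if txt[i] != txt[i+1]:
--       arr.append(i+1)
--   if len(arr) != 2: return False
--   if txt[0] != txt[-1]: return False
--   if arr[0] != len(txt) - arr[-1]: return False
--   return True
-- ===== SOURCE B (Python) =====
-- def is_icecream_sandwich(txt):
--   # run-length encode the string in one pass, then compare the outer runs
--   runs = []
--   for ch in txt:
--     if runs and runs[-1][0] == ch: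
--       c, k = runs[-1]
--       runs[-1] = (c, k + 1)
--     else:
--       runs.append((ch, 1))
--   return len(runs) == 3 and runs[0] == runs[2]
-- ===== Notes on version B (the rewrite author's own statement) =====
-- stated objective: simpler
-- what changed: Replaces the boundary-index list (indices i+1 where txt[i] != txt[i+1]) and its index arithmetic with a one-pass run-length encoding; the answer is just: exactly 3 runs and the first and third runs are identical (same char, same length).
import Mathlib
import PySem

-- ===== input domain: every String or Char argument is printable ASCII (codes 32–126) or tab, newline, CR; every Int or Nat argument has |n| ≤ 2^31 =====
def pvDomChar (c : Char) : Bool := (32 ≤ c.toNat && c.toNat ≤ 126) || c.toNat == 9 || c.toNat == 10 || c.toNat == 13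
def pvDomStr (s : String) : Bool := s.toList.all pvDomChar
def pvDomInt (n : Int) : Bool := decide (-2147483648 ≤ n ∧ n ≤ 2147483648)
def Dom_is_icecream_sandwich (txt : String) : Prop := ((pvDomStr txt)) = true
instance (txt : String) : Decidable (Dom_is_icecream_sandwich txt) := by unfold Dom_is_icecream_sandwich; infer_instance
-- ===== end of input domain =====

-- B replaces A's boundary-index list (indices i+1 with txt[i] != txt[i+1]) by a one-pass
-- run-length encoding: exactly 3 runs with identical first and third run (objective: simpler).

-- ===== PORT A =====
-- literal transliteration of A: collect boundary indices, then the three checks in order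
def pvACore (l : List Char) : Bool :=
  let n : Int := (l.length : Int)
  let arr : List Int := (PySem.List.pyRange 0 (n - 1) 1).foldl
    (fun acc i => if PySem.List.pyGetD l i ' ' ≠ PySem.List.pyGetD l (i + 1) ' ' then acc ++ [i + 1] else acc) []
  if arr.length ≠ 2 then false
  else if PySem.List.pyGetD l 0 ' ' ≠ PySem.List.pyGetD l (-1) ' ' then false
  else if PySem.List.pyGetD arr 0 0 ≠ n - PySem.List.pyGetD arr (-1) 0 then false
  else true

def is_icecream_sandwich (txt : String) : Bool := pvACore txt.toList

-- ===== PORT B =====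
-- one iteration of Source B's loop body: extend the last run or start a new one
def pvRunStep (runs : List (Char × Nat)) (ch : Char) : List (Char × Nat) :=
  match runs.getLast? with
  | some (c, k) => if c = ch then runs.dropLast ++ [(c, k + 1)] else runs ++ [(ch, 1)]
  | none => runs ++ [(ch, 1)]

def pvBCore (l : List Char) : Bool :=
  let runs := l.foldl pvRunStep []
  runs.length == 3 && (PySem.List.pyGetD runs 0 (' ', 0) == PySem.List.pyGetD runs 2 (' ', 0))

def is_icecream_sandwich_alt (txt : String) : Bool := pvBCore txt.toList

-- ===== PRECONDITION & SPEC =====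
def Spec_is_icecream_sandwich (txt : String) (out : Bool) : Prop := out = is_icecream_sandwich_alt txt
instance (txt : String) (out : Bool) : Decidable (Spec_is_icecream_sandwich txt out) := by unfold Spec_is_icecream_sandwich; infer_instance

-- ===== CLAIM (what is proved, stated in full; the proofs are below) =====
def Claim_equal_is_icecream_sandwich : Prop := ∀ (txt : String), Dom_is_icecream_sandwich txt → Spec_is_icecream_sandwich txt (is_icecream_sandwich txt)

-- ===== LEMMAS AND PROOFS =====

-- recursive form of the run-length encoding built by B's foldl
def pvRunsAux : Char → Nat → List Char → List (Char × Nat)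
  | c, k, [] => [(c, k)]
  | c, k, d :: rest => if d = c then pvRunsAux c (k + 1) rest else (c, k) :: pvRunsAux d 1 rest

def pvRuns : List Char → List (Char × Nat)
  | [] => []
  | c :: rest => pvRunsAux c 1 rest

-- the common shape both programs recognise
def pvSand (l : List Char) : Prop :=
  ∃ a b j k, a ≠ b ∧ 1 ≤ j ∧ 1 ≤ k ∧
    l = List.replicate j a ++ (List.replicate k b ++ List.replicate j a)

lemma pv_foldl_runStep : ∀ (l : List Char) (acc : List (Char × Nat)) (c : Char) (k : Nat),
    l.foldl pvRunStep (acc ++ [(c, k)]) = acc ++ pvRunsAux c k l := by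
  intro l
  induction l with
  | nil => intro acc c k; simp [pvRunsAux]
  | cons d rest ih =>
    intro acc c k
    by_cases hd : d = c
    · subst hd
      have hstep : pvRunStep (acc ++ [(d, k)]) d = acc ++ [(d, k + 1)] := by
        simp [pvRunStep]
      rw [List.foldl_cons, hstep, ih]
      simp [pvRunsAux]
    · have hne : c ≠ d := fun h => hd h.symm
      have hstep : pvRunStep (acc ++ [(c, k)]) d = (acc ++ [(c, k)]) ++ [(d, 1)] := by
        simp [pvRunStep, hne]
      rw [List.foldl_cons, hstep, ih]
      simp [pvRunsAux, hd]

lemma pv_runs_eq_foldl (l : List Char) : l.foldl pvRunStep [] = pvRuns l := by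
  cases l with
  | nil => rfl
  | cons c rest =>
    have h0 : pvRunStep [] c = [(c, 1)] := by simp [pvRunStep]
    have := pv_foldl_runStep rest [] c 1
    simp only [List.foldl_cons, h0, pvRuns]
    simpa using this

lemma pv_runsAux_flat : ∀ (l : List Char) (c : Char) (k : Nat),
    (pvRunsAux c k l).flatMap (fun r => List.replicate r.2 r.1) = List.replicate k c ++ l := by
  intro l
  induction l with
  | nil => intro c k; simp [pvRunsAux]
  | cons d rest ih =>
    intro c k
    by_cases hd : d = c
    · subst hd
      have he : pvRunsAux d k (d :: rest) = pvRunsAux d (k + 1) rest := by simp [pvRunsAux]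
      rw [he, ih]
      simp [List.replicate_succ']
    · simp [pvRunsAux, hd, List.flatMap_cons, ih, List.replicate_succ]

lemma pv_runsAux_fst : ∀ (l : List Char) (c : Char) (k : Nat),
    ∃ k', (pvRunsAux c k l).head? = some (c, k') := by
  intro l
  induction l with
  | nil => intro c k; exact ⟨k, rfl⟩
  | cons d rest ih =>
    intro c k
    by_cases hd : d = c
    · subst hd
      have he : pvRunsAux d k (d :: rest) = pvRunsAux d (k + 1) rest := by simp [pvRunsAux]
      rw [he]; exact ih d (k + 1)
    · exact ⟨k, by simp [pvRunsAux, hd]⟩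

lemma pv_runsAux_chain : ∀ (l : List Char) (c : Char) (k : Nat),
    List.IsChain (fun r s => r.1 ≠ s.1) (pvRunsAux c k l) := by
  intro l
  induction l with
  | nil => intro c k; simp [pvRunsAux]
  | cons d rest ih =>
    intro c k
    by_cases hd : d = c
    · subst hd
      have he : pvRunsAux d k (d :: rest) = pvRunsAux d (k + 1) rest := by simp [pvRunsAux]
      rw [he]; exact ih d (k + 1)
    · have hhead : ∀ x ∈ (pvRunsAux d 1 rest).head?, ((c, k).1 ≠ x.1) := by
        obtain ⟨k', hk'⟩ := pv_runsAux_fst rest d 1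
        intro x hx
        rw [hk'] at hx
        simp at hx
        rw [← hx]
        exact fun h => hd h.symm
      simp only [pvRunsAux, if_neg hd]
      exact List.IsChain.cons (ih d 1) hhead

lemma pv_runsAux_pos : ∀ (l : List Char) (c : Char) (k : Nat), 1 ≤ k →
    ∀ r ∈ pvRunsAux c k l, 1 ≤ r.2 := by
  intro l
  induction l with
  | nil => intro c k hk r hr; simp [pvRunsAux] at hr; subst hr; simpa
  | cons d rest ih =>
    intro c k hk r hr
    by_cases hd : d = c
    · subst hd
      have he : pvRunsAux d k (d :: rest) = pvRunsAux d (k + 1) rest := by simp [pvRunsAux]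
      rw [he] at hr
      exact ih _ _ (by omega) r hr
    · simp [pvRunsAux, hd] at hr
      rcases hr with h | h
      · rw [h]; simpa
      · exact ih _ _ (by omega) r h

lemma pv_runsAux_replicate : ∀ (m : Nat) (l : List Char) (c : Char) (k : Nat),
    pvRunsAux c k (List.replicate m c ++ l) = pvRunsAux c (k + m) l := by
  intro m
  induction m with
  | zero => simp
  | succ n ih =>
    intro l c k
    have he : ∀ k', pvRunsAux c k' (c :: (List.replicate n c ++ l)) = pvRunsAux c (k' + 1) (List.replicate n c ++ l) := by
      intro k'; simp [pvRunsAux]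
    rw [List.replicate_succ, List.cons_append, he, ih]
    congr 1
    omega
lemma pv_runs_sand (a b : Char) (j k : Nat) (hab : a ≠ b) (hj : 1 ≤ j) (hk : 1 ≤ k) :
    pvRuns (List.replicate j a ++ (List.replicate k b ++ List.replicate j a)) = [(a, j), (b, k), (a, j)] := by
  have hja : List.replicate j a = a :: List.replicate (j - 1) a := by
    rw [← List.replicate_succ]; congr 1; omega
  have hkb : List.replicate k b = b :: List.replicate (k - 1) b := by
    rw [← List.replicate_succ]; congr 1; omega
  have hba : b ≠ a := fun h => hab h.symm
  have e1 : 1 + (j - 1) = j := by omega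
  have e2 : 1 + (k - 1) = k := by omega
  rw [hja]
  simp only [List.cons_append]
  show pvRunsAux a 1 (List.replicate (j - 1) a ++ (List.replicate k b ++ (a :: List.replicate (j - 1) a))) = _
  rw [pv_runsAux_replicate, e1, hkb]
  simp only [List.cons_append]
  have hstep1 : pvRunsAux a j (b :: (List.replicate (k - 1) b ++ (a :: List.replicate (j - 1) a)))
      = (a, j) :: pvRunsAux b 1 (List.replicate (k - 1) b ++ (a :: List.replicate (j - 1) a)) := by
    simp [pvRunsAux, hba]
  rw [hstep1, pv_runsAux_replicate, e2]
  have hstep2 : pvRunsAux b k (a :: List.replicate (j - 1) a)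
      = (b, k) :: pvRunsAux a 1 (List.replicate (j - 1) a) := by
    simp [pvRunsAux, hab]
  rw [hstep2]
  have h3 : pvRunsAux a 1 (List.replicate (j - 1) a) = pvRunsAux a 1 (List.replicate (j - 1) a ++ []) := by simp
  rw [h3, pv_runsAux_replicate, e1]
  rfl

lemma pv_B_iff (l : List Char) : pvBCore l = true ↔ pvSand l := by
  unfold pvBCore
  rw [pv_runs_eq_foldl]
  constructor
  · intro h
    simp only [Bool.and_eq_true, beq_iff_eq] at h
    obtain ⟨hlen, heq⟩ := h
    obtain ⟨r0, r1, r2, hr⟩ := List.length_eq_three.mp hlen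
    rw [hr] at heq
    have hgt : PySem.List.pyGetD [r0, r1, r2] (0:Int) (' ', 0) = r0 ∧
        PySem.List.pyGetD [r0, r1, r2] (2:Int) (' ', 0) = r2 := by
      constructor <;> rfl
    rw [hgt.1, hgt.2] at heq
    subst heq
    -- l nonempty: runs nonempty
    cases hl : l with
    | nil => rw [hl] at hr; simp [pvRuns] at hr
    | cons c rest =>
      rw [hl] at hr
      have hruns : pvRunsAux c 1 rest = [r0, r1, r0] := hr
      have hflat := pv_runsAux_flat rest c 1
      rw [hruns] at hflat
      have hchain := pv_runsAux_chain rest c 1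
      rw [hruns] at hchain
      have hpos := pv_runsAux_pos rest c 1 (by omega)
      rw [hruns] at hpos
      refine ⟨r0.1, r1.1, r0.2, r1.2, ?_, ?_, ?_, ?_⟩
      · have := List.isChain_cons.mp hchain
        simpa using this.1
      · exact hpos r0 (by simp)
      · exact hpos r1 (by simp)
      · have : List.replicate (1:Nat) c ++ rest = c :: rest := by simp
        rw [← this, ← hflat]
        simp [List.flatMap_cons]
  · rintro ⟨a, b, j, k, hab, hj, hk, hl⟩
    rw [hl, pv_runs_sand a b j k hab hj hk]
    simp only [Bool.and_eq_true, beq_iff_eq]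
    exact ⟨rfl, rfl⟩

def pvArr (l : List Char) : List Int :=
  ((PySem.List.pyRange 0 ((l.length : Int) - 1) 1).filter
      (fun i => decide (PySem.List.pyGetD l i ' ' ≠ PySem.List.pyGetD l (i + 1) ' '))).map (· + 1)

lemma pv_arr_eq (l : List Char) :
    (PySem.List.pyRange 0 ((l.length : Int) - 1) 1).foldl
      (fun acc i => if PySem.List.pyGetD l i ' ' ≠ PySem.List.pyGetD l (i + 1) ' ' then acc ++ [i + 1] else acc) [] = pvArr l := by
  simpa [pvArr] using
    PySem.List.foldl_append_if
      (fun i => decide (PySem.List.pyGetD l i ' ' ≠ PySem.List.pyGetD l (i + 1) ' '))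
      (fun i => i + 1) (PySem.List.pyRange 0 ((l.length : Int) - 1) 1) []

lemma pv_filter_pair {p : Int → Bool} {rng : List Int} (hp : rng.Pairwise (· < ·))
    (nd : rng.Nodup) {x y : Int} (hxy : x < y)
    (h : ∀ i, (i ∈ rng ∧ p i = true) ↔ (i = x ∨ i = y)) : rng.filter p = [x, y] := by
  have nf : (rng.filter p).Nodup := nd.filter p
  have nxy : ([x, y] : List Int).Nodup := by simp; omega
  have hperm : (rng.filter p).Perm [x, y] := by
    rw [List.perm_ext_iff_of_nodup nf nxy]
    intro i
    rw [List.mem_filter]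
    rw [h i]
    simp
  exact List.Perm.eq_of_pairwise (le := (· < ·))
    (fun a b _ _ h1 h2 => absurd h2 (by omega)) (hp.filter p) (by simp [hxy]) hperm

lemma pv_sand_getD (a b : Char) (j k m : Nat) (h : m < j + (k + j)) :
    (List.replicate j a ++ (List.replicate k b ++ List.replicate j a)).getD m ' ' =
      if m < j then a else if m < j + k then b else a := by
  have hlen : (List.replicate j a ++ (List.replicate k b ++ List.replicate j a)).length = j + (k + j) := by simp
  rw [List.getD_eq_getElem _ _ (by omega)]
  simp only [List.getElem_append, List.length_replicate, List.getElem_replicate]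
  split_ifs <;> first | rfl | omega

lemma pv_const_seg (l : List Char) (a : Nat) : ∀ m, a ≤ m →
    (∀ t, a ≤ t → t < m → l.getD t ' ' = l.getD (t + 1) ' ') →
    l.getD m ' ' = l.getD a ' ' := by
  intro m
  induction m with
  | zero => intro h _; have : a = 0 := by omega
            rw [this]
  | succ n ih =>
    intro h hstep
    rcases Nat.lt_or_ge a (n + 1) with hlt | hge
    · have ha : a ≤ n := by omega
      rw [← hstep n ha (by omega)]
      exact ih ha (fun t ht1 ht2 => hstep t ht1 (by omega))
    · have : a = n + 1 := by omega
      rw [this]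

lemma pv_A_char (l : List Char) : pvACore l = true ↔
    ((pvArr l).length = 2 ∧ PySem.List.pyGetD l 0 ' ' = PySem.List.pyGetD l (-1) ' ' ∧
     PySem.List.pyGetD (pvArr l) 0 0 = (l.length : Int) - PySem.List.pyGetD (pvArr l) (-1) 0) := by
  unfold pvACore
  dsimp only
  rw [pv_arr_eq]
  split_ifs with h1 h2 h3 <;> simp_all

lemma pv_sand_filter (a b : Char) (j k : Nat) (hab : a ≠ b) (hj : 1 ≤ j) (hk : 1 ≤ k)
    (l : List Char) (hl : l = List.replicate j a ++ (List.replicate k b ++ List.replicate j a)) :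
    (PySem.List.pyRange 0 ((l.length : Int) - 1) 1).filter
      (fun i => decide (PySem.List.pyGetD l i ' ' ≠ PySem.List.pyGetD l (i + 1) ' ')) =
      [((j - 1 : Nat) : Int), ((j + k - 1 : Nat) : Int)] := by
  have hlen : l.length = j + (k + j) := by rw [hl]; simp
  have hg : ∀ m : Nat, m < j + (k + j) →
      l.getD m ' ' = if m < j then a else if m < j + k then b else a := by
    intro m hm; rw [hl]; exact pv_sand_getD a b j k m hm
  apply pv_filter_pair (PySem.List.pairwise_lt_pyRange_one _ _) (PySem.List.nodup_pyRange_one _ _)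
  · omega
  · intro i
    constructor
    · rintro ⟨hmem, hp⟩
      rw [PySem.List.mem_pyRange_one] at hmem
      obtain ⟨h0, hlt⟩ := hmem
      have him : i = (i.toNat : Int) := by omega
      set m := i.toNat with hm
      rw [him, PySem.List.pyGetD_natCast] at hp
      have hc : ((m : Int) + 1) = ((m + 1 : Nat) : Int) := by push_cast; ring
      rw [hc, PySem.List.pyGetD_natCast] at hp
      have hm1 : m + 1 < j + (k + j) := by rw [hlen] at hlt; omega
      have hne : l.getD m ' ' ≠ l.getD (m + 1) ' ' := by simpa using hp
      rw [hg m (by omega), hg (m + 1) hm1] at hne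
      have hbd : m = j - 1 ∨ m = j + k - 1 := by
        by_contra hcon
        push Not at hcon
        apply hne
        split_ifs <;> first | rfl | omega
      rcases hbd with h | h
      · left; omega
      · right; omega
    · intro hi
      have hmb : ∃ m : Nat, i = (m : Int) ∧ (m = j - 1 ∨ m = j + k - 1) := by
        rcases hi with h | h
        · exact ⟨_, h, Or.inl rfl⟩
        · exact ⟨_, h, Or.inr rfl⟩
      obtain ⟨m, him, hmc⟩ := hmb
      have hm1 : m + 1 < j + (k + j) := by omega
      constructor
      · rw [PySem.List.mem_pyRange_one, hlen]
        constructor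
        · omega
        · rw [him]; push_cast; omega
      · rw [him, PySem.List.pyGetD_natCast]
        have hc : ((m : Int) + 1) = ((m + 1 : Nat) : Int) := by push_cast; ring
        rw [hc, PySem.List.pyGetD_natCast]
        simp only [decide_eq_true_eq]
        rw [hg m (by omega), hg (m + 1) hm1]
        rcases hmc with h | h <;> subst h <;> split_ifs <;>
          first | omega | exact hab | exact (fun hh => hab hh.symm)

lemma pv_A_of_sand (l : List Char) (hs : pvSand l) : pvACore l = true := by
  obtain ⟨a, b, j, k, hab, hj, hk, hl⟩ := hs
  have hlen : l.length = j + (k + j) := by rw [hl]; simp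
  have hg : ∀ m : Nat, m < j + (k + j) →
      l.getD m ' ' = if m < j then a else if m < j + k then b else a := by
    intro m hm; rw [hl]; exact pv_sand_getD a b j k m hm
  have hne : l ≠ [] := by
    intro h; rw [h] at hlen; simp at hlen; omega
  have hfil := pv_sand_filter a b j k hab hj hk l hl
  have harr : pvArr l = [((j - 1 : Nat) : Int) + 1, ((j + k - 1 : Nat) : Int) + 1] := by
    unfold pvArr; rw [hfil]; rfl
  rw [pv_A_char]
  refine ⟨by rw [harr]; rfl, ?_, ?_⟩
  · rw [PySem.List.pyGetD_zero, PySem.List.pyGetD_neg_one l ' ' hne, List.getLast_eq_getElem,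
        ← List.getD_eq_getElem l ' ' (by omega : l.length - 1 < l.length)]
    have h0 : l.getD 0 ' ' = a := by rw [hg 0 (by omega)]; split_ifs <;> first | rfl | omega
    have h1 : l.getD (l.length - 1) ' ' = a := by
      rw [hlen, hg (j + (k + j) - 1) (by omega)]; split_ifs <;> first | rfl | omega
    rw [h0, h1]
  · rw [harr, hlen]
    rw [PySem.List.pyGetD_zero_cons,
        PySem.List.pyGetD_neg_one _ 0 (by simp : ([((j - 1 : Nat) : Int) + 1, ((j + k - 1 : Nat) : Int) + 1] : List Int) ≠ [])]
    simp only [List.getLast]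
    push_cast
    omega

lemma pv_sand_of_A (l : List Char) (hA : pvACore l = true) : pvSand l := by
  rw [pv_A_char] at hA
  obtain ⟨hlen2, hends, hbal⟩ := hA
  -- the filtered boundary list has exactly two elements x < y
  set p : Int → Bool := fun i => decide (PySem.List.pyGetD l i ' ' ≠ PySem.List.pyGetD l (i + 1) ' ') with hp
  set rng := PySem.List.pyRange 0 ((l.length : Int) - 1) 1 with hrng
  have hfl : (rng.filter p).length = 2 := by
    have h2 := hlen2
    unfold pvArr at h2
    rw [← hp, ← hrng, List.length_map] at h2
    exact h2
  obtain ⟨x, y, hxy⟩ := List.length_eq_two.mp hfl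
  have hsorted : (rng.filter p).Pairwise (· < ·) :=
    (PySem.List.pairwise_lt_pyRange_one _ _).filter p
  have hxy_lt : x < y := by
    rw [hxy] at hsorted; simpa using hsorted
  have hxmem : x ∈ rng ∧ p x = true := by
    have : x ∈ rng.filter p := by rw [hxy]; simp
    simpa [List.mem_filter] using this
  have hymem : y ∈ rng ∧ p y = true := by
    have : y ∈ rng.filter p := by rw [hxy]; simp
    simpa [List.mem_filter] using this
  have hxr := PySem.List.mem_pyRange_one.mp hxmem.1
  have hyr := PySem.List.mem_pyRange_one.mp hymem.1
  set X := x.toNat with hX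
  set Y := y.toNat with hY
  have hxX : x = (X : Int) := by omega
  have hyY : y = (Y : Int) := by omega
  have hXY : X < Y := by omega
  have hYn : Y + 1 < l.length := by omega
  -- boundary facts in Nat form
  have hpnat : ∀ m : Nat, p (m : Int) = true ↔ l.getD m ' ' ≠ l.getD (m + 1) ' ' := by
    intro m
    rw [hp]
    have hc : ((m : Int) + 1) = ((m + 1 : Nat) : Int) := by push_cast; ring
    simp only [hc, PySem.List.pyGetD_natCast, decide_eq_true_eq]
  have hpX : l.getD X ' ' ≠ l.getD (X + 1) ' ' := (hpnat X).mp (hxX ▸ hxmem.2)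
  have hother : ∀ m : Nat, m + 1 < l.length → m ≠ X → m ≠ Y → l.getD m ' ' = l.getD (m + 1) ' ' := by
    intro m hm hmX hmY
    by_contra hcon
    have hmem : (m : Int) ∈ rng := by
      rw [hrng, PySem.List.mem_pyRange_one]; omega
    have : (m : Int) ∈ rng.filter p := by
      rw [List.mem_filter]; exact ⟨hmem, (hpnat m).mpr hcon⟩
    rw [hxy] at this
    simp at this
    rcases this with h | h <;> [exact hmX (by omega); exact hmY (by omega)]
  -- the three checks in Nat form
  have hends' : l.getD 0 ' ' = l.getD (l.length - 1) ' ' := by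
    have hne : l ≠ [] := by intro h; rw [h] at hYn; simp at hYn
    rw [PySem.List.pyGetD_zero, PySem.List.pyGetD_neg_one l ' ' hne, List.getLast_eq_getElem,
        ← List.getD_eq_getElem l ' ' (by omega : l.length - 1 < l.length)] at hends
    exact hends
  have hbal' : X + 1 + (Y + 1) = l.length := by
    have harr : pvArr l = [x + 1, y + 1] := by unfold pvArr; rw [← hrng, ← hp, hxy]; rfl
    rw [harr, PySem.List.pyGetD_zero_cons,
        PySem.List.pyGetD_neg_one _ 0 (by simp : ([x + 1, y + 1] : List Int) ≠ [])] at hbal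
    simp only [List.getLast] at hbal
    omega
  -- constant segments
  set a := l.getD 0 ' ' with ha
  set bb := l.getD (X + 1) ' ' with hbb
  have hseg1 : ∀ m : Nat, m ≤ X → l.getD m ' ' = a := by
    intro m hm
    exact pv_const_seg l 0 m (by omega) (fun t ht1 ht2 => hother t (by omega) (by omega) (by omega))
  have hseg2 : ∀ m : Nat, X + 1 ≤ m → m ≤ Y → l.getD m ' ' = bb := by
    intro m h1 h2
    exact pv_const_seg l (X + 1) m h1 (fun t ht1 ht2 => hother t (by omega) (by omega) (by omega))
  have hseg3 : ∀ m : Nat, Y + 1 ≤ m → m ≤ l.length - 1 → l.getD m ' ' = l.getD (Y + 1) ' ' := by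
    intro m h1 h2
    exact pv_const_seg l (Y + 1) m h1 (fun t ht1 ht2 => hother t (by omega) (by omega) (by omega))
  have hcc : l.getD (Y + 1) ' ' = a := by
    rw [← hseg3 (l.length - 1) (by omega) (by omega)]
    exact hends'.symm
  have habb : a ≠ bb := by
    intro h
    apply hpX
    rw [hseg1 X (by omega)]
    exact h
  refine ⟨a, bb, X + 1, Y - X, habb, by omega, by omega, ?_⟩
  apply List.ext_getElem
  · simp; omega
  · intro m hm1 hm2
    have hmn : m < l.length := hm1
    rw [← List.getD_eq_getElem l ' ' hm1,
        ← List.getD_eq_getElem _ ' ' hm2, pv_sand_getD a bb (X + 1) (Y - X) m (by omega)]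
    split_ifs with h1 h2
    · exact hseg1 m (by omega)
    · exact hseg2 m (by omega) (by omega)
    · rw [← hcc]
      exact hseg3 m (by omega) (by omega)

lemma pv_A_iff (l : List Char) : pvACore l = true ↔ pvSand l :=
  ⟨pv_sand_of_A l, pv_A_of_sand l⟩

-- ===== VERDICT (by name: the statement is the Claim_ definition above) =====
theorem is_icecream_sandwich_spec : Claim_equal_is_icecream_sandwich := by
  intro txt _
  show is_icecream_sandwich txt = is_icecream_sandwich_alt txt
  have hA := pv_A_iff txt.toList
  have hB := pv_B_iff txt.toList
  unfold is_icecream_sandwich is_icecream_sandwich_alt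
  cases hxa : pvACore txt.toList <;> cases hxb : pvBCore txt.toList <;> simp_all
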